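-- pv_equiv track=rewrite | github.com/moht-agrawal-rubrik/tlean | backend/github/pr_processor.py | _find_pending_responses
-- ===== SOURCE A (Python) =====
-- from typing import Dict, List, Any, Optional
--
-- def _find_pending_responses(comments: List[Dict[str, Any]], author: str) -> int:
--     """Find comments that need responses from the PR author."""
--     pending_count = 0
--
--     # Sort comments by creation time
--     sorted_comments = sorted(comments, key=lambda x: x.get('created_at', ''))
--
--     # Track which non-author comments need responses
--     for i, comment in enumerate(sorted_comments):
--         comment_author = comment.get('author', '')
--
--         # Skip author's own comments
--         if comment_author == author:
--             continue
--
--         # Check if author responded after this comment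
--         has_response = False
--         for j in range(i + 1, len(sorted_comments)):
--             later_comment = sorted_comments[j]
--             if later_comment.get('author') == author:
--                 has_response = True
--                 break
--
--         if not has_response:
--             pending_count += 1
--
--     return pending_count
-- ===== SOURCE B (Python) =====
-- def _find_pending_responses(comments, author):
--     """Find comments that need responses from the PR author."""
--     # Single forward pass: collect non-author comments in `pending`;
--     # whenever the author comments, everything so far has been answered,
--     # so the pending list is reset.  What remains at the end is unanswered.
--     sorted_comments = sorted(comments, key=lambda x: x.get('created_at', ''))
--     pending = []
--     for comment in sorted_comments:
--         if comment.get('author') == author: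
--             pending = []
--         elif comment.get('author', '') != author:
--             pending.append(comment)
--     return len(pending)
-- ===== Notes on version B (the rewrite author's own statement) =====
-- stated objective: alternative
-- what changed: Replaces A's per-comment forward scan for a later author comment (quadratic in the worst case) by one forward pass keeping a pending list that is reset whenever an author comment is seen; the answer is the final list's length.
import Mathlib
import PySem

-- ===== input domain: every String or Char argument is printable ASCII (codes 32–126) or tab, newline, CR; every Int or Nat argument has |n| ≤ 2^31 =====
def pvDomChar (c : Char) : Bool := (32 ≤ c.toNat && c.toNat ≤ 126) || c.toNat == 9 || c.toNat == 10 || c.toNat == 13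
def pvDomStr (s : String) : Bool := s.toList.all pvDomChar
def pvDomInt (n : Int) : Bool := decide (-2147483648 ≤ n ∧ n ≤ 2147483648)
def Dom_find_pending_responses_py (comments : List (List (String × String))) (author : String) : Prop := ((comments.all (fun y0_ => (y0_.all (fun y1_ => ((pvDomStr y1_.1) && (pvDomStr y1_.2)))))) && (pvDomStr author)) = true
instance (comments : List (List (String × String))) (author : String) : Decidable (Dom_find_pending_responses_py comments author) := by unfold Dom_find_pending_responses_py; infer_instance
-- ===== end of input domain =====

-- B replaces A's nested scan by one forward pass keeping a pending list that is
-- reset at each author comment (objective: alternative single-pass algorithm).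


-- ===== PORT A =====
-- outer loop over the sorted comments; for each one, the inner 'for j in range(i+1, …)'
-- with break scans the later comments (the suffix) for one whose 'author' equals author
-- (dicts are association lists; .get is first-match lookup = List.lookup)
def pvALoop (author : String) : List (List (String × String)) → Int
  | [] => 0
  | c :: rest =>
    let comment_author := (List.lookup "author" c).getD ""
    if comment_author = author then pvALoop author rest
    else
      let has_response := rest.any (fun lc => List.lookup "author" lc == some author)
      (if !has_response then 1 else 0) + pvALoop author rest

def find_pending_responses_py (comments : List (List (String × String))) (author : String) : Int :=
  let sorted_comments := PySem.List.sorted comments (key := fun x => (List.lookup "created_at" x).getD "")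
  pvALoop author sorted_comments

-- ===== PORT B =====
-- 'pending = []; for c in sorted: if author comment: pending = []
--  elif c.get("author","") != author: pending.append(c); return len(pending)'
def pvBStep (author : String) (pending : List (List (String × String)))
    (c : List (String × String)) : List (List (String × String)) :=
  if List.lookup "author" c == some author then []
  else if (List.lookup "author" c).getD "" ≠ author then pending ++ [c]
  else pending

def find_pending_responses_py_alt (comments : List (List (String × String))) (author : String) : Int :=
  let sorted_comments := PySem.List.sorted comments (key := fun x => (List.lookup "created_at" x).getD "")
  ((sorted_comments.foldl (pvBStep author) []).length : Int)

-- ===== PRECONDITION & SPEC =====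
def Spec_find_pending_responses_py (comments : List (List (String × String))) (author : String) (out : Int) : Prop := out = find_pending_responses_py_alt comments author
instance (comments : List (List (String × String))) (author : String) (out : Int) : Decidable (Spec_find_pending_responses_py comments author out) := by unfold Spec_find_pending_responses_py; infer_instance

-- ===== CLAIM (what is proved, stated in full; the proofs are below) =====
def Claim_equal_find_pending_responses_py : Prop := ∀ (comments : List (List (String × String))) (author : String), Dom_find_pending_responses_py comments author → Spec_find_pending_responses_py comments author (find_pending_responses_py comments author)

-- ===== LEMMAS AND PROOFS =====

-- Invariant of B's fold: the final length equals (length of the carried pending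
-- list, unless an author comment still lies ahead and will reset it) + A's count.
theorem pvFold_length (author : String) (s : List (List (String × String))) :
    ∀ pending : List (List (String × String)),
      ((s.foldl (pvBStep author) pending).length : Int) =
        (if s.any (fun lc => List.lookup "author" lc == some author) then 0
         else (pending.length : Int)) + pvALoop author s := by
  induction s with
  | nil => intro pending; simp [pvALoop]
  | cons c t ih =>
    intro pending
    simp only [List.foldl_cons, List.any_cons, pvALoop, pvBStep]
    by_cases hc : (List.lookup "author" c == some author) = true
    · have hgd : (List.lookup "author" c).getD "" = author := by
        rcases h : List.lookup "author" c with _ | v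
        · simp [h] at hc
        · simp [h] at hc ⊢; exact hc
      simp [hc, hgd, ih]
    · have hc' : List.lookup "author" c ≠ some author := by
        intro h; simp [h] at hc
      simp only [hc, Bool.false_or]
      by_cases hgd : (List.lookup "author" c).getD "" = author
      · simp [hgd, ih]
      · simp only [if_pos hgd, if_neg hgd, ih]
        by_cases ht : (t.any (fun lc => List.lookup "author" lc == some author)) = true
        · simp [ht]
        · simp [ht]; ring

-- ===== VERDICT (by name: the statement is the Claim_ definition above) =====
theorem find_pending_responses_py_spec : Claim_equal_find_pending_responses_py := by
  intro comments author _
  unfold Spec_find_pending_responses_py find_pending_responses_py find_pending_responses_py_alt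
  rw [pvFold_length]
  split_ifs <;> simp
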